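-- pv_equiv track=rewrite | github.com/BiancoAM/variant-analyzer | backend/services/variant_service.py | _calculate_classification
-- ===== SOURCE A (Python) =====
-- from typing import Dict, Any, List
--
-- def _calculate_classification(evidence: Dict[str, Any]) -> str:
--     """
--     Calculate ACMG classification based on evidence
--
--     Simplified logic - full implementation would follow ACMG combination rules
--     """
--     pathogenic = evidence.get("pathogenic", [])
--     benign = evidence.get("benign", [])
--
--     # Check for stand-alone evidence
--     for ev in benign:
--         if ev["strength"] == "Stand-alone":
--             return "Benign"
--
--     for ev in pathogenic:
--         if ev["strength"] == "Very Strong":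
--             if any(e["strength"] in ["Strong", "Moderate"] for e in pathogenic):
--                 return "Pathogenic"
--             return "Likely Pathogenic"
--
--     # Count evidence by strength
--     path_strong = sum(1 for e in pathogenic if e["strength"] == "Strong")
--     path_moderate = sum(1 for e in pathogenic if e["strength"] == "Moderate")
--     path_supporting = sum(1 for e in pathogenic if e["strength"] == "Supporting")
--
--     ben_strong = sum(1 for e in benign if e["strength"] == "Strong")
--     ben_supporting = sum(1 for e in benign if e["strength"] == "Supporting")
--
--     # Simplified classification rules
--     if path_strong >= 2 or (path_strong >= 1 and path_moderate >= 2):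
--         return "Pathogenic"
--     elif path_strong >= 1 and path_moderate >= 1:
--         return "Likely Pathogenic"
--     elif ben_strong >= 2:
--         return "Benign"
--     elif ben_strong >= 1 and ben_supporting >= 1:
--         return "Likely Benign"
--
--     return "Uncertain Significance (VUS)"
-- ===== SOURCE B (Python) =====
-- from typing import Dict, Any, List
--
-- def _calculate_classification(evidence: Dict[str, Any]) -> str:
--     pathogenic = evidence.get("pathogenic", [])
--     benign = evidence.get("benign", [])
--
--     def tally(evs: List[Dict[str, str]]) -> Dict[str, int]:
--         counts = {"Very Strong": 0, "Strong": 0, "Moderate": 0,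
--                   "Supporting": 0, "Stand-alone": 0}
--         for e in evs:
--             s = e["strength"]
--             if s in counts:
--                 counts[s] += 1
--         return counts
--
--     p = tally(pathogenic)
--     b = tally(benign)
--
--     # ordered rule table: first satisfied rule decides the classification
--     rules = [
--         (b["Stand-alone"] >= 1, "Benign"),
--         (p["Very Strong"] >= 1 and p["Strong"] + p["Moderate"] >= 1, "Pathogenic"),
--         (p["Very Strong"] >= 1, "Likely Pathogenic"),
--         (p["Strong"] >= 2 or (p["Strong"] >= 1 and p["Moderate"] >= 2), "Pathogenic"),
--         (p["Strong"] >= 1 and p["Moderate"] >= 1, "Likely Pathogenic"),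
--         (b["Strong"] >= 2, "Benign"),
--         (b["Strong"] >= 1 and b["Supporting"] >= 1, "Likely Benign"),
--     ]
--     for hit, label in rules:
--         if hit:
--             return label
--     return "Uncertain Significance (VUS)"
-- ===== Notes on version B (the rewrite author's own statement) =====
-- stated objective: alternative
-- what changed: A's two early-returning scans plus five separate sum() passes and an if/elif chain are replaced by one tallying pass per evidence list into a fixed strength->count table and a data-driven ordered rule table whose first satisfied rule decides the classification.
-- outside the precondition, e.g. on _calculate_classification({'benign': [{'strength': 'Stand-alone'}, {}]}): A returns 'Benign', B raises KeyError
import Mathlib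
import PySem

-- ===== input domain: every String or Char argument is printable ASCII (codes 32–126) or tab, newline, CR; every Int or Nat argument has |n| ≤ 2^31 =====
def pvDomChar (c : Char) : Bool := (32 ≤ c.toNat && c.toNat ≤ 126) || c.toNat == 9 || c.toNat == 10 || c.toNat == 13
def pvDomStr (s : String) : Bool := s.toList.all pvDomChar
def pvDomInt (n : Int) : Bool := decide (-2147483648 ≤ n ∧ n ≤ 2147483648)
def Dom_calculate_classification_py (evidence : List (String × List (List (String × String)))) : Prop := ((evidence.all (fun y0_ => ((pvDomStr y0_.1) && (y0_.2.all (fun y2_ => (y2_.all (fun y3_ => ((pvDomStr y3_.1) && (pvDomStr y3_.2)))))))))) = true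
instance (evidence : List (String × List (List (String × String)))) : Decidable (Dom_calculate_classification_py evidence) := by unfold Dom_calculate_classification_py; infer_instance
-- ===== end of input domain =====

-- B replaces A's early-return scans, five sum() passes and if/elif chain by one strength->count
-- tally per list and an ordered rule table (objective: alternative decomposition, same cost).
-- Pre_ excludes inputs where some evidence element lacks a "strength" key: Python A raises
-- KeyError there unless an early return fires first, and B's full tallying pass raises there.


-- shared tiny helper: ev["strength"], totalized with "" exactly where Python raises KeyError
-- (those inputs are excluded by Pre_ below)
def pvStrength (e : List (String × String)) : String :=
  (PySem.Dict.mk e).getD "strength" ""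

def pvHasStrength (e : List (String × String)) : Bool :=
  (PySem.Dict.mk e).contains "strength"

-- ===== PORT A =====
-- the second loop's inner any(): membership of e["strength"] in ["Strong", "Moderate"]
def pvStrongOrModerate (e : List (String × String)) : Bool :=
  ["Strong", "Moderate"].contains (pvStrength e)

-- 'for ev in benign: if ev["strength"] == "Stand-alone": return "Benign"'
def pvBenignLoopA : List (List (String × String)) → Option String
  | [] => none
  | e :: rest => if pvStrength e == "Stand-alone" then some "Benign" else pvBenignLoopA rest

-- 'for ev in pathogenic: if ev["strength"] == "Very Strong": …' (inner any over the whole list)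
def pvPathLoopA (pathogenic : List (List (String × String))) :
    List (List (String × String)) → Option String
  | [] => none
  | e :: rest =>
      if pvStrength e == "Very Strong" then
        some (if pathogenic.any pvStrongOrModerate then "Pathogenic" else "Likely Pathogenic")
      else pvPathLoopA pathogenic rest

def calculate_classification_py (evidence : List (String × List (List (String × String)))) : String :=
  let pathogenic := (PySem.Dict.mk evidence).getD "pathogenic" []
  let benign := (PySem.Dict.mk evidence).getD "benign" []
  match pvBenignLoopA benign with
  | some r => r
  | none =>
  match pvPathLoopA pathogenic pathogenic with
  | some r => r
  | none =>
    let path_strong := (pathogenic.map (fun e => if pvStrength e == "Strong" then (1:Int) else 0)).sum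
    let path_moderate := (pathogenic.map (fun e => if pvStrength e == "Moderate" then (1:Int) else 0)).sum
    let _path_supporting := (pathogenic.map (fun e => if pvStrength e == "Supporting" then (1:Int) else 0)).sum
    let ben_strong := (benign.map (fun e => if pvStrength e == "Strong" then (1:Int) else 0)).sum
    let ben_supporting := (benign.map (fun e => if pvStrength e == "Supporting" then (1:Int) else 0)).sum
    if path_strong ≥ 2 ∨ (path_strong ≥ 1 ∧ path_moderate ≥ 2) then "Pathogenic"
    else if path_strong ≥ 1 ∧ path_moderate ≥ 1 then "Likely Pathogenic"
    else if ben_strong ≥ 2 then "Benign"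
    else if ben_strong ≥ 1 ∧ ben_supporting ≥ 1 then "Likely Benign"
    else "Uncertain Significance (VUS)"

-- ===== PORT B =====
-- Source B's tally(): a fixed five-key count table, one pass, only listed strengths counted
def pvTally (evs : List (List (String × String))) : PySem.Dict String Int :=
  evs.foldl
    (fun c e =>
      let s := pvStrength e
      if c.contains s then c.insert s (c.getD s 0 + 1) else c)
    (PySem.Dict.mk [("Very Strong", 0), ("Strong", 0), ("Moderate", 0),
                    ("Supporting", 0), ("Stand-alone", 0)])

def calculate_classification_py_alt (evidence : List (String × List (List (String × String)))) : String :=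
  let pathogenic := (PySem.Dict.mk evidence).getD "pathogenic" []
  let benign := (PySem.Dict.mk evidence).getD "benign" []
  let p := pvTally pathogenic
  let b := pvTally benign
  let rules : List (Bool × String) :=
    [ (b.getD "Stand-alone" 0 ≥ 1, "Benign"),
      (p.getD "Very Strong" 0 ≥ 1 && p.getD "Strong" 0 + p.getD "Moderate" 0 ≥ 1, "Pathogenic"),
      (p.getD "Very Strong" 0 ≥ 1, "Likely Pathogenic"),
      (p.getD "Strong" 0 ≥ 2 || (p.getD "Strong" 0 ≥ 1 && p.getD "Moderate" 0 ≥ 2), "Pathogenic"),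
      (p.getD "Strong" 0 ≥ 1 && p.getD "Moderate" 0 ≥ 1, "Likely Pathogenic"),
      (b.getD "Strong" 0 ≥ 2, "Benign"),
      (b.getD "Strong" 0 ≥ 1 && b.getD "Supporting" 0 ≥ 1, "Likely Benign") ]
  match rules.find? (fun r => r.1) with
  | some r => r.2
  | none => "Uncertain Significance (VUS)"

-- ===== PRECONDITION & SPEC =====
-- Pre_ requires every element of both evidence lists to carry a "strength" key: outside it
-- Python A raises KeyError except when an early return fires before the key-less element is
-- read (B's tallying pass raises KeyError on all such inputs).
def Pre_calculate_classification_py (evidence : List (String × List (List (String × String)))) : Prop :=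
  ((((PySem.Dict.mk evidence).getD "pathogenic" []).all pvHasStrength) &&
   (((PySem.Dict.mk evidence).getD "benign" []).all pvHasStrength)) = true
instance (evidence : List (String × List (List (String × String)))) : Decidable (Pre_calculate_classification_py evidence) := by unfold Pre_calculate_classification_py; infer_instance

def pvWitness_calculate_classification_py : (List (String × List (List (String × String)))) :=
  [("pathogenic", [[("strength", "Strong")], [("strength", "Moderate")], [("strength", "Moderate")]]),
   ("benign", [[("strength", "Supporting")]])]

def Spec_calculate_classification_py (evidence : List (String × List (List (String × String)))) (out : String) : Prop := out = calculate_classification_py_alt evidence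
instance (evidence : List (String × List (List (String × String)))) (out : String) : Decidable (Spec_calculate_classification_py evidence out) := by unfold Spec_calculate_classification_py; infer_instance

-- ===== CLAIM (what is proved, stated in full; the proofs are below) =====
def Claim_equal_calculate_classification_py : Prop := ∀ (evidence : List (String × List (List (String × String)))), Dom_calculate_classification_py evidence → Pre_calculate_classification_py evidence → Spec_calculate_classification_py evidence (calculate_classification_py evidence)

-- ===== LEMMAS AND PROOFS =====

-- A's benign loop is "is there a Stand-alone element?"
theorem pvBenignLoopA_eq (l : List (List (String × String))) :
    pvBenignLoopA l = if l.any (fun ev => pvStrength ev == "Stand-alone") then some "Benign" else none := by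
  induction l with
  | nil => simp [pvBenignLoopA]
  | cons e rest ih =>
      simp only [pvBenignLoopA, List.any_cons, ih]
      by_cases h : pvStrength e == "Stand-alone" <;> simp [h]

-- A's pathogenic loop is "is there a Very Strong element?" (inner any over the full list)
theorem pvPathLoopA_eq (full l : List (List (String × String))) :
    pvPathLoopA full l =
      if l.any (fun ev => pvStrength ev == "Very Strong") then
        some (if full.any pvStrongOrModerate then "Pathogenic" else "Likely Pathogenic")
      else none := by
  induction l with
  | nil => simp [pvPathLoopA]
  | cons e rest ih =>
      simp only [pvPathLoopA, List.any_cons, ih]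
      by_cases h : pvStrength e == "Very Strong" <;> simp [h]

-- tally's fold, read at a key the accumulator already contains, counts occurrences of that key
theorem pvTallyAux (l : List (List (String × String))) (k : String) :
    ∀ d : PySem.Dict String Int, d.contains k = true →
      (l.foldl
        (fun c e =>
          let s := pvStrength e
          if c.contains s then c.insert s (c.getD s 0 + 1) else c) d).getD k 0
        = d.getD k 0 + ((l.map pvStrength).count k : Int) := by
  induction l with
  | nil => intro d _; simp
  | cons e rest ih =>
      intro d hd
      simp only [List.foldl_cons, List.map_cons]
      by_cases hs : d.contains (pvStrength e) = true
      · rw [if_pos hs, ih _ (by rw [PySem.Dict.contains_insert, hd, Bool.or_true])]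
        rw [PySem.Dict.getD_insert]
        by_cases hk : k = pvStrength e
        · subst hk; simp; ring
        · rw [if_neg hk, List.count_cons]
          simp only [beq_iff_eq]
          rw [if_neg (fun h => hk h.symm)]
          push_cast; ring
      · rw [if_neg hs, ih _ hd, List.count_cons]
        have hne : pvStrength e ≠ k := fun h => hs (h ▸ hd)
        simp only [beq_iff_eq]
        rw [if_neg hne]
        simp

-- tally read at one of the five listed strengths = occurrence count of that strength
theorem pvTally_getD (l : List (List (String × String))) (k : String)
    (hk : k ∈ ["Very Strong", "Strong", "Moderate", "Supporting", "Stand-alone"]) :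
    (pvTally l).getD k 0 = ((l.map pvStrength).count k : Int) := by
  simp only [List.mem_cons, List.not_mem_nil, or_false] at hk
  unfold pvTally
  rcases hk with rfl | rfl | rfl | rfl | rfl <;>
    · rw [pvTallyAux l _ _ (by decide)]
      simp [PySem.Dict.getD_eq_get?_getD, PySem.Dict.get?_mk_cons]

-- A's 0/1-sum over a list = occurrence count of that strength
theorem pvSum_eq_count (l : List (List (String × String))) (k : String) :
    (l.map (fun e => if pvStrength e == k then (1:Int) else 0)).sum
      = ((l.map pvStrength).count k : Int) := by
  rw [PySem.List.sum_map_ite_one_zero, List.count_eq_countP, List.countP_map]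
  rfl

-- any-with-equality ↔ count ≥ 1
theorem pvAny_iff_count (l : List (List (String × String))) (k : String) :
    (l.any (fun ev => pvStrength ev == k) = true) ↔ 1 ≤ (l.map pvStrength).count k := by
  rw [List.any_eq_true]
  constructor
  · rintro ⟨e, he, hk⟩
    have : k ∈ l.map pvStrength := List.mem_map.mpr ⟨e, he, by simpa using hk⟩
    exact List.count_pos_iff.mpr this
  · intro h
    obtain ⟨e, he, hk⟩ := List.mem_map.mp (List.count_pos_iff.mp h)
    exact ⟨e, he, by simp [hk]⟩

-- the inner membership any ↔ Strong count + Moderate count ≥ 1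
theorem pvAnySM_iff (l : List (List (String × String))) :
    (l.any pvStrongOrModerate = true) ↔
      1 ≤ (l.map pvStrength).count "Strong" + (l.map pvStrength).count "Moderate" := by
  constructor
  · rintro h
    obtain ⟨e, he, hk⟩ := List.any_eq_true.mp h
    rcases (by simpa [pvStrongOrModerate] using hk : pvStrength e = "Strong" ∨ pvStrength e = "Moderate") with h' | h'
    · have := List.count_pos_iff.mpr (List.mem_map.mpr ⟨e, he, h'⟩)
      omega
    · have := List.count_pos_iff.mpr (List.mem_map.mpr ⟨e, he, h'⟩)
      omega
  · intro h
    rcases Nat.lt_or_ge 0 ((l.map pvStrength).count "Strong") with h1 | h1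
    · obtain ⟨e, he, hk⟩ := List.mem_map.mp (List.count_pos_iff.mp h1)
      exact List.any_eq_true.mpr ⟨e, he, by simp [pvStrongOrModerate, hk]⟩
    · have h2 : 0 < (l.map pvStrength).count "Moderate" := by omega
      obtain ⟨e, he, hk⟩ := List.mem_map.mp (List.count_pos_iff.mp h2)
      exact List.any_eq_true.mpr ⟨e, he, by simp [pvStrongOrModerate, hk]⟩

-- ===== VERDICT (by name: the statement is the Claim_ definition above) =====
theorem calculate_classification_py_spec : Claim_equal_calculate_classification_py := by
  intro evidence _ _
  unfold Spec_calculate_classification_py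
  unfold calculate_classification_py calculate_classification_py_alt
  set P := (PySem.Dict.mk evidence).getD "pathogenic" [] with hP
  set B := (PySem.Dict.mk evidence).getD "benign" [] with hB
  have tbsa := pvTally_getD B "Stand-alone" (by decide)
  have tpvs := pvTally_getD P "Very Strong" (by decide)
  have tps := pvTally_getD P "Strong" (by decide)
  have tpm := pvTally_getD P "Moderate" (by decide)
  have tbs := pvTally_getD B "Strong" (by decide)
  have tbp := pvTally_getD B "Supporting" (by decide)
  simp only [pvBenignLoopA_eq, pvPathLoopA_eq, pvSum_eq_count,
    tbsa, tpvs, tps, tpm, tbs, tbp]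
  by_cases hsa : B.any (fun ev => pvStrength ev == "Stand-alone") = true
  · have h1 : (1:Int) ≤ ((B.map pvStrength).count "Stand-alone" : Int) := by
      have := (pvAny_iff_count _ _).mp hsa; exact_mod_cast this
    simp [hsa, List.find?, h1]
  · have h0 : (B.map pvStrength).count "Stand-alone" = 0 := by
      rcases Nat.eq_zero_or_pos ((B.map pvStrength).count "Stand-alone") with h | h
      · exact h
      · exact absurd ((pvAny_iff_count _ _).mpr h) hsa
    have hlt : ¬ ((1:Int) ≤ ((B.map pvStrength).count "Stand-alone" : Int)) := by
      rw [h0]; norm_num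
    by_cases hvs : P.any (fun ev => pvStrength ev == "Very Strong") = true
    · have h1 : (1:Int) ≤ ((P.map pvStrength).count "Very Strong" : Int) := by
        have := (pvAny_iff_count _ _).mp hvs; exact_mod_cast this
      by_cases hsm : P.any pvStrongOrModerate = true
      · have h2 : (1:Int) ≤ ((P.map pvStrength).count "Strong" : Int)
            + ((P.map pvStrength).count "Moderate" : Int) := by
          have := (pvAnySM_iff _).mp hsm; exact_mod_cast this
        simp [hsa, hvs, hsm, List.find?, hlt, h1, h2]
      · have h2 : (P.map pvStrength).count "Strong" + (P.map pvStrength).count "Moderate" = 0 := by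
          rcases Nat.eq_zero_or_pos _ with h | h
          · exact h
          · exact absurd ((pvAnySM_iff _).mpr h) hsm
        have h2' : ¬ ((1:Int) ≤ ((P.map pvStrength).count "Strong" : Int)
            + ((P.map pvStrength).count "Moderate" : Int)) := by
          have hs0 : (P.map pvStrength).count "Strong" = 0 := by omega
          have hm0 : (P.map pvStrength).count "Moderate" = 0 := by omega
          rw [hs0, hm0]; norm_num
        simp [hsa, hvs, hsm, List.find?, hlt, h1, h2']
    · have hvs0 : (P.map pvStrength).count "Very Strong" = 0 := by
        rcases Nat.eq_zero_or_pos ((P.map pvStrength).count "Very Strong") with h | h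
        · exact h
        · exact absurd ((pvAny_iff_count _ _).mpr h) hvs
      have hvslt : ¬ ((1:Int) ≤ ((P.map pvStrength).count "Very Strong" : Int)) := by
        rw [hvs0]; norm_num
      set cps := ((P.map pvStrength).count "Strong" : Int) with hcps
      set cpm := ((P.map pvStrength).count "Moderate" : Int) with hcpm
      set cbs := ((B.map pvStrength).count "Strong" : Int) with hcbs
      set cbp := ((B.map pvStrength).count "Supporting" : Int) with hcbp
      simp only [hsa, hvs, Bool.false_eq_true, if_false]
      by_cases c1a : (2:Int) ≤ cps
      · simp [List.find?, hlt, hvslt, c1a]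
      · by_cases c1b : (1:Int) ≤ cps ∧ (2:Int) ≤ cpm
        · simp [List.find?, hlt, hvslt, c1b.1, c1b.2, c1a]
        · have hc1 : ¬ ((2:Int) ≤ cps ∨ ((1:Int) ≤ cps ∧ (2:Int) ≤ cpm)) := by tauto
          by_cases c2 : (1:Int) ≤ cps ∧ (1:Int) ≤ cpm
          · by_cases hm2 : (2:Int) ≤ cpm
            · exact absurd ⟨c2.1, hm2⟩ c1b
            · simp [List.find?, hlt, hvslt, hc1, c1a, c2.1, c2.2, hm2]
          · have hc2 : ¬ ((1:Int) ≤ cps ∧ (1:Int) ≤ cpm) := c2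
            by_cases c3 : (2:Int) ≤ cbs
            · by_cases hp1 : (1:Int) ≤ cps
              · have hm1 : ¬ ((1:Int) ≤ cpm) := fun h => hc2 ⟨hp1, h⟩
                have hm2 : ¬ ((2:Int) ≤ cpm) := fun h => c1b ⟨hp1, h⟩
                simp [List.find?, hlt, hvslt, hc1, c1a, hc2, c3, hp1, hm1, hm2]
              · simp [List.find?, hlt, hvslt, hc1, c1a, hc2, c3, hp1]
            · by_cases c4 : (1:Int) ≤ cbs ∧ (1:Int) ≤ cbp
              · by_cases hp1 : (1:Int) ≤ cps
                · have hm1 : ¬ ((1:Int) ≤ cpm) := fun h => hc2 ⟨hp1, h⟩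
                  have hm2 : ¬ ((2:Int) ≤ cpm) := fun h => c1b ⟨hp1, h⟩
                  simp [List.find?, hlt, hvslt, hc1, c1a, hc2, c3, c4.1, c4.2, hp1, hm1, hm2]
                · simp [List.find?, hlt, hvslt, hc1, c1a, hc2, c3, c4.1, c4.2, hp1]
              · by_cases hp1 : (1:Int) ≤ cps
                · have hm1 : ¬ ((1:Int) ≤ cpm) := fun h => hc2 ⟨hp1, h⟩
                  have hm2 : ¬ ((2:Int) ≤ cpm) := fun h => c1b ⟨hp1, h⟩
                  by_cases hb1 : (1:Int) ≤ cbs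
                  · have hb2 : ¬ ((1:Int) ≤ cbp) := fun h => c4 ⟨hb1, h⟩
                    simp [List.find?, hlt, hvslt, hc1, c1a, hc2, c3, c4, hp1, hm1, hm2, hb1, hb2]
                  · simp [List.find?, hlt, hvslt, hc1, c1a, hc2, c3, c4, hp1, hm1, hm2, hb1]
                · by_cases hb1 : (1:Int) ≤ cbs
                  · have hb2 : ¬ ((1:Int) ≤ cbp) := fun h => c4 ⟨hb1, h⟩
                    simp [List.find?, hlt, hvslt, hc1, c1a, hc2, c3, c4, hp1, hb1, hb2]
                  · simp [List.find?, hlt, hvslt, hc1, c1a, hc2, c3, c4, hp1, hb1]
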